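-- pv_equiv track=rewrite | github.com/mihaelahrihor/grundlagen-der-programmierung | L2/ex 6.py | gaseste_cea_mai_lunga_subsecventa_domino
-- ===== SOURCE A (Python) =====
-- def gaseste_cea_mai_lunga_subsecventa_domino(lista):
--     cea_mai_lunga_subsecventa = []
--     subsecventa_curenta = [lista[0]]
--
--     for i in range(1, len(lista)):
--         x1, y1 = lista[i - 1]
--         x2, y2 = lista[i]
--
--         if y1 == x2:
--             subsecventa_curenta.append(lista[i])
--         else:
--             if len(subsecventa_curenta) > len(cea_mai_lunga_subsecventa):
--                 cea_mai_lunga_subsecventa = subsecventa_curenta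
--             subsecventa_curenta = [lista[i]]
--
--     if len(subsecventa_curenta) > len(cea_mai_lunga_subsecventa):
--         cea_mai_lunga_subsecventa = subsecventa_curenta
--
--     return cea_mai_lunga_subsecventa
-- ===== SOURCE B (Python) =====
-- def gaseste_cea_mai_lunga_subsecventa_domino(lista):
--     run, best_len, best_end = 1, 1, 0
--     for i in range(1, len(lista)):
--         run = run + 1 if lista[i - 1][1] == lista[i][0] else 1
--         if run > best_len:
--             best_len, best_end = run, i
--     return lista[best_end - best_len + 1 : best_end + 1]
-- ===== Notes on version B (the rewrite author's own statement) =====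
-- stated objective: alternative
-- what changed: B replaces A's materialized current/best sublists with a run-length DP over indices (three integer registers: run length ending at i, best length, best end index) and returns a single slice of the input at the end; same O(n) cost.
import Mathlib
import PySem

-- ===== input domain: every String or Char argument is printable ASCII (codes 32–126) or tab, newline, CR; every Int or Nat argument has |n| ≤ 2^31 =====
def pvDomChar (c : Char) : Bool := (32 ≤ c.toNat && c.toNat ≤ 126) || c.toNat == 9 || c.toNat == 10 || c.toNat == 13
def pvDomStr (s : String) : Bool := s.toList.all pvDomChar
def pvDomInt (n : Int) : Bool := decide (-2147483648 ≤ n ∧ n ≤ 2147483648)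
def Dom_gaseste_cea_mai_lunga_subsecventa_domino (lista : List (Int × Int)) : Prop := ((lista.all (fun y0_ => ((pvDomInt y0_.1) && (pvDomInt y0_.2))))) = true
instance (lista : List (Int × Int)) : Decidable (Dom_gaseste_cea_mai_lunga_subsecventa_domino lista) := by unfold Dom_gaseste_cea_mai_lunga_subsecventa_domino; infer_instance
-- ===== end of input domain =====

-- ===== PORT A =====
-- B tracks run lengths with three integer registers and slices once at the end,
-- instead of A's materialized current/best sublists (alternative; same O(n) cost).

-- the for-loop of A: state = (best, cur); prev is lista[i-1], rest the remaining lista[i:]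
def pvLoopA (prev : Int × Int) (rest : List (Int × Int))
    (best cur : List (Int × Int)) : List (Int × Int) :=
  match rest with
  | [] => if cur.length > best.length then cur else best
  | x :: xs =>
    if prev.2 = x.1 then
      pvLoopA x xs best (cur ++ [x])
    else
      pvLoopA x xs (if cur.length > best.length then cur else best) [x]

def gaseste_cea_mai_lunga_subsecventa_domino (lista : List (Int × Int)) : List (Int × Int) :=
  match lista with
  | [] => []          -- Python raises IndexError on lista[0]; excluded by Pre_
  | h :: t => pvLoopA h t [] [h]

-- ===== PORT B =====
-- Source B's loop: prev = lista[i-1], rest = lista[i:], i the current index;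
-- state = (run, bestLen, bestEnd), three integer registers, no sublists
def pvLoopB (prev : Int × Int) (rest : List (Int × Int))
    (i run bestLen bestEnd : Nat) : Nat × Nat :=
  match rest with
  | [] => (bestLen, bestEnd)
  | x :: xs =>
    let run' := if prev.2 = x.1 then run + 1 else 1
    if run' > bestLen then pvLoopB x xs (i + 1) run' run' i
    else pvLoopB x xs (i + 1) run' bestLen bestEnd

def gaseste_cea_mai_lunga_subsecventa_domino_alt (lista : List (Int × Int)) : List (Int × Int) :=
  let p : Nat × Nat :=
    match lista with
    | [] => (1, 0)                      -- loop body never runs: initial (best_len, best_end)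
    | h :: t => pvLoopB h t 1 1 1 0
  PySem.List.slice lista (some ((p.2 : Int) - (p.1 : Int) + 1)) (some ((p.2 : Int) + 1))

-- ===== PRECONDITION & SPEC =====
-- Pre_: A indexes lista[0], so the empty list raises IndexError
def Pre_gaseste_cea_mai_lunga_subsecventa_domino (lista : List (Int × Int)) : Prop := lista ≠ []
instance (lista : List (Int × Int)) : Decidable (Pre_gaseste_cea_mai_lunga_subsecventa_domino lista) := by unfold Pre_gaseste_cea_mai_lunga_subsecventa_domino; infer_instance
def pvWitness_gaseste_cea_mai_lunga_subsecventa_domino : (List (Int × Int)) := [(1, 2), (2, 3), (5, 6)]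

def Spec_gaseste_cea_mai_lunga_subsecventa_domino (lista : List (Int × Int)) (out : List (Int × Int)) : Prop := out = gaseste_cea_mai_lunga_subsecventa_domino_alt lista
instance (lista : List (Int × Int)) (out : List (Int × Int)) : Decidable (Spec_gaseste_cea_mai_lunga_subsecventa_domino lista out) := by unfold Spec_gaseste_cea_mai_lunga_subsecventa_domino; infer_instance

-- ===== CLAIM (what is proved, stated in full; the proofs are below) =====
def Claim_equal_gaseste_cea_mai_lunga_subsecventa_domino : Prop := ∀ (lista : List (Int × Int)), Dom_gaseste_cea_mai_lunga_subsecventa_domino lista → Pre_gaseste_cea_mai_lunga_subsecventa_domino lista → Spec_gaseste_cea_mai_lunga_subsecventa_domino lista (gaseste_cea_mai_lunga_subsecventa_domino lista)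


-- ===== LEMMAS AND PROOFS =====

-- Invariant: run = |cur| ≥ 1, cur is the last `run` elements of the processed prefix
-- L.take i, and (bestLen, bestEnd) describe exactly A's would-be answer
-- `if |cur| > |best| then cur else best` as a slice of L.
theorem pvLoop_invariant (L : List (Int × Int)) (rest : List (Int × Int)) :
    ∀ (i run bestLen bestEnd : Nat) (prev : Int × Int) (bestA cur : List (Int × Int)),
      L.drop i = rest →
      run ≤ i → 1 ≤ run → run = cur.length →
      (L.drop (i - run)).take run = cur →
      bestLen ≤ bestEnd + 1 →
      bestLen = (if cur.length > bestA.length then cur else bestA).length →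
      (L.drop (bestEnd + 1 - bestLen)).take bestLen
        = (if cur.length > bestA.length then cur else bestA) →
      (pvLoopB prev rest i run bestLen bestEnd).1
          ≤ (pvLoopB prev rest i run bestLen bestEnd).2 + 1 ∧
        (L.drop ((pvLoopB prev rest i run bestLen bestEnd).2 + 1
                  - (pvLoopB prev rest i run bestLen bestEnd).1)).take
            (pvLoopB prev rest i run bestLen bestEnd).1
          = pvLoopA prev rest bestA cur := by
  induction rest with
  | nil =>
    intro i run bestLen bestEnd prev bestA cur hdrop hri hr1 hrlen hcur hble hblen hbest
    refine ⟨hble, ?_⟩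
    simp only [pvLoopA, pvLoopB]
    exact hbest
  | cons x xs ih =>
    intro i run bestLen bestEnd prev bestA cur hdrop hri hr1 hrlen hcur hble hblen hbest
    have hdrop' : L.drop (i + 1) = xs := by
      have h1 : L.drop (i + 1) = (L.drop i).drop 1 := by
        rw [List.drop_drop, Nat.add_comm]
      rw [h1, hdrop]; rfl
    -- the processed prefix decomposes: L.drop (i - run) = cur ++ x :: xs
    have hdecomp : L.drop (i - run) = cur ++ x :: xs := by
      have h1 : (L.drop (i - run)).take run ++ (L.drop (i - run)).drop run
          = L.drop (i - run) := List.take_append_drop _ _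
      have h2 : (L.drop (i - run)).drop run = L.drop i := by
        rw [List.drop_drop]; congr 1; omega
      rw [← h1, hcur, h2, hdrop]
    by_cases h : prev.2 = x.1
    · -- chain continues: cur' = cur ++ [x], run' = run + 1
      have hcur' : (L.drop (i + 1 - (run + 1))).take (run + 1) = cur ++ [x] := by
        have he : i + 1 - (run + 1) = i - run := by omega
        have hsplit : cur ++ x :: xs = (cur ++ [x]) ++ xs := by simp
        have hl : (cur ++ [x]).length = run + 1 := by simp [hrlen]
        rw [he, hdecomp, hsplit, ← hl, List.take_left]
      by_cases h2 : run + 1 > bestLen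
      · have hgt : (cur ++ [x]).length > bestA.length := by
          have hb : bestA.length ≤ bestLen := by
            rw [hblen]; split <;> omega
          simp only [List.length_append, List.length_cons, List.length_nil]
          omega
        have := ih (i + 1) (run + 1) (run + 1) i x bestA (cur ++ [x]) hdrop'
          (by omega) (by omega) (by simp [hrlen])
          hcur' (by omega)
          (by rw [if_pos hgt]; simp [hrlen])
          (by rw [if_pos hgt]; exact hcur')
        simpa [pvLoopA, pvLoopB, h, h2] using this
      · -- run+1 ≤ bestLen forces best = bestA and cur' still not longer
        have hba : ¬ cur.length > bestA.length := by
          intro hc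
          have : bestLen = cur.length := by rw [hblen, if_pos hc]
          omega
        have hba' : ¬ (cur ++ [x]).length > bestA.length := by
          have : bestLen = bestA.length := by rw [hblen, if_neg hba]
          simp only [List.length_append, List.length_cons, List.length_nil]
          omega
        rw [if_neg hba] at hblen hbest
        have := ih (i + 1) (run + 1) bestLen bestEnd x bestA (cur ++ [x]) hdrop'
          (by omega) (by omega) (by simp [hrlen]) hcur' hble
          (by rw [if_neg hba']; exact hblen)
          (by rw [if_neg hba']; exact hbest)
        simpa [pvLoopA, pvLoopB, h, h2] using this
    · -- chain breaks: bestA' = if |cur|>|bestA| then cur else bestA, cur' = [x]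
      have hbl1 : 1 ≤ bestLen := by
        rw [hblen]; split <;> omega
      have h2 : ¬ (1 > bestLen) := by omega
      set S := if cur.length > bestA.length then cur else bestA with hS
      have hcur' : (L.drop (i + 1 - 1)).take 1 = [x] := by
        simp [hdrop]
      have hnb : ¬ ([x] : List (Int × Int)).length > S.length := by
        simp only [List.length_cons, List.length_nil]
        omega
      have := ih (i + 1) 1 bestLen bestEnd x S [x] hdrop'
        (by omega) (le_refl 1) (by simp) hcur' hble
        (by rw [if_neg hnb]; exact hblen)
        (by rw [if_neg hnb]; exact hbest)
      simpa [pvLoopA, pvLoopB, h, h2, ← hS] using this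

-- ===== VERDICT (by name: the statement is the Claim_ definition above) =====
theorem gaseste_cea_mai_lunga_subsecventa_domino_spec : Claim_equal_gaseste_cea_mai_lunga_subsecventa_domino := by
  intro lista _ hpre
  unfold Spec_gaseste_cea_mai_lunga_subsecventa_domino
  match lista with
  | [] => exact absurd rfl hpre
  | h :: t =>
    obtain ⟨hle, heq⟩ := pvLoop_invariant (h :: t) t 1 1 1 0 h [] [h]
      (by simp) (le_refl 1) (le_refl 1) (by simp) (by simp) (le_refl 1) (by simp) (by simp)
    show pvLoopA h t [] [h]
        = PySem.List.slice (h :: t)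
            (some (((pvLoopB h t 1 1 1 0).2 : Int) - ((pvLoopB h t 1 1 1 0).1 : Int) + 1))
            (some (((pvLoopB h t 1 1 1 0).2 : Int) + 1))
    set p := pvLoopB h t 1 1 1 0 with hp
    have hcast : ((p.2 : Int) - (p.1 : Int) + 1) = ((p.2 + 1 - p.1 : Nat) : Int) := by
      push_cast [Nat.cast_sub (by omega : p.1 ≤ p.2 + 1)]; ring
    have hcast2 : ((p.2 : Int) + 1) = ((p.2 + 1 : Nat) : Int) := by push_cast; ring
    rw [hcast, hcast2, PySem.List.slice_natCast]
    have hsub : p.2 + 1 - (p.2 + 1 - p.1) = p.1 := by omega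
    rw [hsub]
    exact heq.symm
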